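-- pv_equiv track=rewrite | github.com/FusRoman/fink-fat | fink_fat/others/id_tags.py | alphabetic_tag
-- ===== SOURCE A (Python) =====
-- def alphabetic_tag(int_id: int, nb_alphabetic: int) -> str:
--     """
--     Make an alphabetic tag in base 26.
--
--     Parameters
--     ----------
--     int_id : int
--         tag identifier
--     nb_alphabetic : int
--         number of symbol in the tag
--
--     Returns
--     -------
--     str
--         the tag
--
--     Examples
--     --------
--     >>> alphabetic_tag(0, 0)
--     ''
--     >>> alphabetic_tag(0, 3)
--     'aaa'
--     >>> alphabetic_tag(3, 5)
--     'aaaad'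
--     >>> alphabetic_tag(100, 5)
--     'aaadw'
--     >>> alphabetic_tag(675, 2)
--     'zz'
--     >>> alphabetic_tag(676, 2)
--     'aa'
--     """
--     res_tag = ""
--     for _ in range(nb_alphabetic):
--         q = int(int_id / 26)
--         r = int(int_id % 26)
--
--         res_tag += chr(r + 97)
--         int_id = q
--
--     return res_tag[::-1]
-- ===== SOURCE B (Python) =====
-- def alphabetic_tag(int_id: int, nb_alphabetic: int) -> str:
--     """Base-26 alphabetic tag, written as the classic recursive base conversion:
--     convert the higher-order part first, then append the last digit's letter.
--     Once the value is exhausted the remaining leading symbols are all 'a'."""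
--     if nb_alphabetic <= 0:
--         return ""
--     if int_id == 0:
--         return "a" * nb_alphabetic
--     return alphabetic_tag(int(int_id / 26), nb_alphabetic - 1) + chr(int(int_id % 26) + 97)
-- ===== Notes on version B (the rewrite author's own statement) =====
-- stated objective: simpler
-- what changed: Replaces the iterative digit loop that accumulates the string LSB-first and reverses it at the end by the classic recursive base-26 conversion: recurse on the quotient for the leading part, emitting the remaining all-'a' prefix in one bulk step once the value is exhausted, then append the current least-significant letter, so no reversal, no mutable state, and no per-character loop over the padding.
import Mathlib
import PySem

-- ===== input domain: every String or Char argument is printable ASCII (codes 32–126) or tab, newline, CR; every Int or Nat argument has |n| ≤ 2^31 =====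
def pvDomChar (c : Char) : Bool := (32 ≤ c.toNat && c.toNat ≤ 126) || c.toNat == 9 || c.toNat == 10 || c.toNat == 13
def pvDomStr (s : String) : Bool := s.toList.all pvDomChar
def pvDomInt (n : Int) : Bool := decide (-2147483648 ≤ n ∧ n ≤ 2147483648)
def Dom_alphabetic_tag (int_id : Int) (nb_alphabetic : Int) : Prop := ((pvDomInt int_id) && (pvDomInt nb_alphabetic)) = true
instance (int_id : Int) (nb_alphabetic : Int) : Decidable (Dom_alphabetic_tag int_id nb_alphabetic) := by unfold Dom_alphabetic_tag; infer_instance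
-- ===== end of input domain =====

-- B is the classic recursive base-26 conversion (higher-order digits by the recursive call,
-- then the current letter appended), replacing A's loop + accumulate-then-reverse: simpler.

-- ===== PORT A =====
-- res_tag is carried as a List Char (s += c  is  ++ [c]); res_tag[::-1] is List.reverse
-- (exact: PySem.List.slice?_none_none_neg_one).
-- Python's q = int(int_id / 26) (float division truncated toward zero) equals Int.tdiv int_id 26
-- exactly for |int_id| ≤ 2^31 (well inside double exactness), the stated domain.
-- int(int_id % 26) = PySem.Int.mod int_id 26 (already an int in [0, 26)).
def alphabetic_tag (int_id : Int) (nb_alphabetic : Int) : String :=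
  let st := (PySem.List.pyRange 0 nb_alphabetic 1).foldl
    (fun (st : Int × List Char) _ =>
      let q := Int.tdiv st.1 26
      let r := PySem.Int.mod st.1 26
      (q, st.2 ++ [Char.ofNat (r + 97).toNat]))
    (int_id, [])
  String.ofList st.2.reverse

-- ===== PORT B =====
-- Source B's recursion, step for step: nb_alphabetic <= 0 returns "", int_id == 0 returns
-- "a" * nb_alphabetic, otherwise the recursive call on (int(int_id / 26), nb_alphabetic - 1)
-- with chr(int(int_id % 26) + 97) appended.  int(int_id / 26) is Int.tdiv (see port A).
def alphabetic_tag_alt (int_id : Int) (nb_alphabetic : Int) : String :=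
  if _h : nb_alphabetic ≤ 0 then ""
  else if int_id = 0 then String.ofList (List.replicate nb_alphabetic.toNat 'a')
  else alphabetic_tag_alt (Int.tdiv int_id 26) (nb_alphabetic - 1)
        ++ String.ofList [Char.ofNat (PySem.Int.mod int_id 26 + 97).toNat]
termination_by nb_alphabetic.toNat
decreasing_by omega

-- ===== PRECONDITION & SPEC =====
def Spec_alphabetic_tag (int_id : Int) (nb_alphabetic : Int) (out : String) : Prop := out = alphabetic_tag_alt int_id nb_alphabetic
instance (int_id : Int) (nb_alphabetic : Int) (out : String) : Decidable (Spec_alphabetic_tag int_id nb_alphabetic out) := by unfold Spec_alphabetic_tag; infer_instance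

-- ===== CLAIM (what is proved, stated in full; the proofs are below) =====
def Claim_equal_alphabetic_tag : Prop := ∀ (int_id : Int) (nb_alphabetic : Int), Dom_alphabetic_tag int_id nb_alphabetic → Spec_alphabetic_tag int_id nb_alphabetic (alphabetic_tag int_id nb_alphabetic)

-- ===== LEMMAS AND PROOFS =====

theorem pvOfList_append (l m : List Char) :
    String.ofList (l ++ m) = String.ofList l ++ String.ofList m := by
  apply String.toList_injective; simp

theorem pvOfList_nil : String.ofList ([] : List Char) = "" := by
  apply String.toList_injective; simp

-- the character of the least-significant digit of i
def pvDigit (i : Int) : Char := Char.ofNat (PySem.Int.mod i 26 + 97).toNat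

-- the shared quotient step
def pvQ (i : Int) : Int := Int.tdiv i 26

-- the LSB-first digit list A's loop accumulates
def pvLsb (i : Int) : Nat → List Char
  | 0 => []
  | n + 1 => pvDigit i :: pvLsb (pvQ i) n

-- growing the count appends the digit of the iterated quotient at the end
theorem pvLsb_snoc (n : Nat) (i : Int) :
    pvLsb i (n + 1) = pvLsb i n ++ [pvDigit (pvQ^[n] i)] := by
  induction n generalizing i with
  | zero => simp [pvLsb]
  | succ n ih =>
      calc pvLsb i (n + 2) = pvDigit i :: pvLsb (pvQ i) (n + 1) := rfl
        _ = pvDigit i :: (pvLsb (pvQ i) n ++ [pvDigit (pvQ^[n] (pvQ i))]) := by rw [ih]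
        _ = pvLsb i (n + 1) ++ [pvDigit (pvQ^[n + 1] i)] := by
              rw [Function.iterate_succ_apply]; rfl

-- A's loop invariant: after n iterations the state is (pvQ^[n] i, pvLsb i n)
theorem foldA_eq (n : Nat) (i : Int) :
    (PySem.List.pyRange 0 (n : Int) 1).foldl
      (fun (st : Int × List Char) _ =>
        (Int.tdiv st.1 26, st.2 ++ [Char.ofNat (PySem.Int.mod st.1 26 + 97).toNat]))
      (i, []) = (pvQ^[n] i, pvLsb i n) := by
  induction n with
  | zero => simp [PySem.List.pyRange_one_eq_nil, pvLsb]
  | succ n ih =>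
      have hsplit : PySem.List.pyRange 0 ((n : Int) + 1) 1
          = PySem.List.pyRange 0 (n : Int) 1 ++ [(n : Int)] :=
        PySem.List.pyRange_one_succ_right (by omega)
      rw [show ((n + 1 : Nat) : Int) = (n : Int) + 1 by omega, hsplit, List.foldl_append, ih,
          pvLsb_snoc]
      simp [Function.iterate_succ_apply', pvQ, pvDigit]

-- once the value is 0 every remaining digit is 'a'
theorem pvLsb_zero (m : Nat) : pvLsb 0 m = List.replicate m 'a' := by
  induction m with
  | zero => rfl
  | succ m ih =>
      rw [pvLsb, show pvQ 0 = 0 by rfl, ih, List.replicate_succ]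
      rfl

-- B's recursion produces exactly the reversed LSB-first digit list
theorem alt_eq_lsb (n : Nat) (i : Int) :
    alphabetic_tag_alt i (n : Int) = String.ofList (pvLsb i n).reverse := by
  induction n generalizing i with
  | zero => rw [alphabetic_tag_alt]; simp [pvLsb]
  | succ n ih =>
      rw [alphabetic_tag_alt]
      rw [dif_neg (by omega)]
      by_cases h0 : i = 0
      · rw [if_pos h0, h0, pvLsb_zero, List.reverse_replicate]
        norm_num
      rw [if_neg h0]
      rw [show ((n + 1 : Nat) : Int) - 1 = (n : Int) by omega, ih]
      show String.ofList (pvLsb (pvQ i) n).reverse ++ String.ofList [pvDigit i]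
          = String.ofList (pvDigit i :: pvLsb (pvQ i) n).reverse
      rw [List.reverse_cons, pvOfList_append]

-- ===== VERDICT (by name: the statement is the Claim_ definition above) =====
theorem alphabetic_tag_spec : Claim_equal_alphabetic_tag := by
  intro i nb _
  unfold Spec_alphabetic_tag alphabetic_tag
  by_cases h : 0 < nb
  · have hnb : nb = (nb.toNat : Int) := by omega
    rw [hnb, foldA_eq, alt_eq_lsb]
  · rw [PySem.List.pyRange_one_eq_nil (by omega), alphabetic_tag_alt,
        dif_pos (by omega)]
    exact pvOfList_nil.symm ▸ rfl
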